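-- pv_equiv track=rewrite | github.com/rustyrussell/lightning-payencode | lightning-address.py | to_u35
-- ===== SOURCE A (Python) =====
-- def to_u35(val):
--     assert val < (1 << 35)
--     ret = []
--     for i in range(0,7):
--         ret.append(val % 32)
--         val //= 32
--     ret.reverse()
--     return ret
-- ===== SOURCE B (Python) =====
-- def to_u35(val):
--     assert val < (1 << 35)
--     return [(val // (32 ** (6 - i))) % 32 for i in range(7)]
-- ===== Notes on version B (the rewrite author's own statement) =====
-- stated objective: simpler
-- what changed: B computes each of the seven base-thirtytwo digits directly from val by dividing by the matching power of the base, most-significant first, instead of A's loop that mutates a running quotient, appends least-significant digits and reverses the list.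
import Mathlib
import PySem

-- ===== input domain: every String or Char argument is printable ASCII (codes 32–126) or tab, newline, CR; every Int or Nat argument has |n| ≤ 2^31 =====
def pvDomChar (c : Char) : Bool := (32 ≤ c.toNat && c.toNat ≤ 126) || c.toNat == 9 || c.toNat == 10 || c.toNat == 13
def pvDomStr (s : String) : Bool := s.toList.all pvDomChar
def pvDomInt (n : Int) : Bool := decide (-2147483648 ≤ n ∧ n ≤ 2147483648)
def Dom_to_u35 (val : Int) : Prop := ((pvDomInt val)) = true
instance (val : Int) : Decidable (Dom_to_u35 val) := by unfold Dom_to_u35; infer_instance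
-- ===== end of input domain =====

-- B extracts each digit directly by dividing by the matching power of the base (no mutated quotient, no reverse); same values, simpler shape.

-- ===== PORT A =====
def to_u35 (val : Int) : List Int :=
  -- the assert in A always passes on Dom (|val| is bounded well below the asserted limit)
  (((PySem.List.pyRange 0 7 1).foldl
    (fun (st : List Int × Int) _ => (st.1 ++ [PySem.Int.mod st.2 32], PySem.Int.floordiv st.2 32))
    ([], val)).1).reverse

-- ===== PORT B =====
def to_u35_alt (val : Int) : List Int :=
  (PySem.List.pyRange 0 7 1).map (fun i => PySem.Int.mod (PySem.Int.floordiv val (32 ^ (6 - i).toNat)) 32)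

-- ===== PRECONDITION & SPEC =====
def Spec_to_u35 (val : Int) (out : List Int) : Prop := out = to_u35_alt val
instance (val : Int) (out : List Int) : Decidable (Spec_to_u35 val out) := by unfold Spec_to_u35; infer_instance

-- ===== CLAIM (what is proved, stated in full; the proofs are below) =====
def Claim_equal_to_u35 : Prop := ∀ (val : Int), Dom_to_u35 val → Spec_to_u35 val (to_u35 val)

-- ===== LEMMAS AND PROOFS =====
theorem pv_range7 : PySem.List.pyRange 0 7 1 = [0,1,2,3,4,5,6] := by decide

-- ===== VERDICT (by name: the statement is the Claim_ definition above) =====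
theorem to_u35_spec : Claim_equal_to_u35 := by
  intro val _
  unfold Spec_to_u35
  simp only [to_u35, to_u35_alt, pv_range7, List.foldl, List.map, List.reverse]
  norm_num [(by decide : Int.toNat 6 = 6), (by decide : Int.toNat 5 = 5),
    (by decide : Int.toNat 4 = 4), (by decide : Int.toNat 3 = 3), (by decide : Int.toNat 2 = 2),
    PySem.Int.floordiv_eq_ediv_of_pos (by norm_num : (0:Int) < 32),
    PySem.Int.mod_eq_emod_of_pos (by norm_num : (0:Int) < 32),
    PySem.Int.floordiv_eq_ediv_of_pos (by norm_num : (0:Int) < 1),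
    PySem.Int.floordiv_eq_ediv_of_pos (by norm_num : (0:Int) < 1024),
    PySem.Int.floordiv_eq_ediv_of_pos (by norm_num : (0:Int) < 32768),
    PySem.Int.floordiv_eq_ediv_of_pos (by norm_num : (0:Int) < 1048576),
    PySem.Int.floordiv_eq_ediv_of_pos (by norm_num : (0:Int) < 33554432),
    PySem.Int.floordiv_eq_ediv_of_pos (by norm_num : (0:Int) < 1073741824),
    Int.ediv_ediv_of_nonneg (by norm_num : (0:Int) ≤ 32),
    Int.ediv_ediv_of_nonneg (by norm_num : (0:Int) ≤ 1024),
    Int.ediv_ediv_of_nonneg (by norm_num : (0:Int) ≤ 32768),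
    Int.ediv_ediv_of_nonneg (by norm_num : (0:Int) ≤ 1048576),
    Int.ediv_ediv_of_nonneg (by norm_num : (0:Int) ≤ 33554432)]
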